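-- pv_equiv track=rewrite | github.com/ChanLim-BD/DS-Algorithm | Programmers/LV.0/등수 매기기(기억하기).py | solution
-- ===== SOURCE A (Python) =====
-- def solution(score):
--     x = []
--     for s in score:
--         x.append(s[0] + s[1])
--     y = sorted(x, reverse=True)
--     p_ind = []
--     for i in x:
--         p_ind.append(y.index(i)+1)
--     return p_ind
-- ===== SOURCE B (Python) =====
-- def solution(score):
--     x = [s[0] + s[1] for s in score]
--     return [1 + sum(1 for w in x if w > v) for v in x]
-- ===== Notes on version B (the rewrite author's own statement) =====
-- stated objective: alternative
-- what changed: Replaces sort-then-y.index ranking by direct comparison counting: each rank is 1 plus the number of strictly greater pair-sums; no sorted list is built or scanned.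
import Mathlib
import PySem

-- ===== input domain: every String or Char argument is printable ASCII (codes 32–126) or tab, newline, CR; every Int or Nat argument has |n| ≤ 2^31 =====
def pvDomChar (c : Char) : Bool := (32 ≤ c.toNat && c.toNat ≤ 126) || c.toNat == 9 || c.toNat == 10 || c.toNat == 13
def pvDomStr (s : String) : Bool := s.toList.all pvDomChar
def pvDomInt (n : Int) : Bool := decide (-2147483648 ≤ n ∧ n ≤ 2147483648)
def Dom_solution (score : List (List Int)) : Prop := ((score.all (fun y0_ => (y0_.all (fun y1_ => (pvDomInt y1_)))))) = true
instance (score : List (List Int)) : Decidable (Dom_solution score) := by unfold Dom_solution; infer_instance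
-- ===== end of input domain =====

-- ===== PORT A =====
-- x = [s[0]+s[1]] loop; y = sorted(x, reverse=True); ranks by y.index(i)+1.
-- s[0]/s[1] are in range under Pre_solution, so pyGetD's default never fires.
def solution (score : List (List Int)) : List Int :=
  let x := score.foldl (fun acc s =>
    acc ++ [PySem.List.pyGetD s 0 0 + PySem.List.pyGetD s 1 0]) []
  let y := PySem.List.sorted x (fun v => v) true
  x.foldl (fun acc i =>
    acc ++ [((PySem.List.index? y i).getD 0 : Int) + 1]) []

-- ===== PORT B =====
-- rank of v = 1 + number of pair-sums strictly greater than v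
def solution_alt (score : List (List Int)) : List Int :=
  let x := score.map (fun s => PySem.List.pyGetD s 0 0 + PySem.List.pyGetD s 1 0)
  x.map (fun v => 1 + (x.countP (fun w => decide (v < w)) : Int))

-- ===== PRECONDITION & SPEC =====
-- A raises IndexError on s[0]/s[1] when an inner list has fewer than 2 entries; exactly those inputs are excluded.
def Pre_solution (score : List (List Int)) : Prop := ∀ s ∈ score, 2 ≤ s.length
instance (score : List (List Int)) : Decidable (Pre_solution score) := by unfold Pre_solution; infer_instance
def pvWitness_solution : List (List Int) := ([[1, 2], [3, 4], [1, 2]])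

def Spec_solution (score : List (List Int)) (out : List Int) : Prop := out = solution_alt score
instance (score : List (List Int)) (out : List Int) : Decidable (Spec_solution score out) := by unfold Spec_solution; infer_instance

-- ===== CLAIM (what is proved, stated in full; the proofs are below) =====
def Claim_equal_solution : Prop := ∀ (score : List (List Int)), Dom_solution score → Pre_solution score → Spec_solution score (solution score)

-- ===== LEMMAS AND PROOFS =====

-- In a descending-sorted list, the first index of a member v counts the elements strictly greater than v.
theorem index_desc_eq_countP (y : List Int) (hy : y.Pairwise (fun a b => b ≤ a)) :
    ∀ v ∈ y, PySem.List.index? y v = some (y.countP (fun w => decide (v < w))) := by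
  induction y with
  | nil => intro v hv; cases hv
  | cons a t ih =>
    rcases List.pairwise_cons.mp hy with ⟨ha, ht⟩
    intro v hv
    by_cases hav : a = v
    · subst hav
      rw [PySem.List.index?_cons_self, List.countP_cons]
      have h0 : t.countP (fun w => decide (a < w)) = 0 := by
        rw [List.countP_eq_zero]
        intro w hw
        simpa using not_lt.mpr (ha w hw)
      simp [h0]
    · have hvt : v ∈ t := by
        cases hv with
        | head => exact absurd rfl hav
        | tail _ h => exact h
      rw [PySem.List.index?_cons_of_ne t hav, ih ht v hvt, List.countP_cons]
      have hva : v < a := lt_of_le_of_ne (ha v hvt) (fun h => hav h.symm)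
      simp [hva, Nat.add_comm]

theorem solution_eq_alt (score : List (List Int)) : solution score = solution_alt score := by
  unfold solution solution_alt
  rw [PySem.List.foldl_append_singleton_eq_map, PySem.List.foldl_append_singleton_eq_map]
  simp only [List.nil_append]
  set x := score.map (fun s => PySem.List.pyGetD s 0 0 + PySem.List.pyGetD s 1 0) with hx
  apply List.map_congr_left
  intro v hv
  have hperm : (PySem.List.sorted x (fun v => v) true).Perm x := PySem.List.sorted_perm x _ true
  have hpair : (PySem.List.sorted x (fun v => v) true).Pairwise (fun a b => b ≤ a) :=
    PySem.List.sorted_pairwise_rev x (fun v => v)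
  have hvmem : v ∈ PySem.List.sorted x (fun v => v) true :=
    (PySem.List.mem_sorted x (fun v => v) true v).mpr hv
  rw [index_desc_eq_countP _ hpair v hvmem]
  rw [hperm.countP_eq]
  simp [Int.add_comm]

-- ===== VERDICT (by name: the statement is the Claim_ definition above) =====
theorem solution_spec : Claim_equal_solution := by
  intro score _ _
  exact solution_eq_alt score
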